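-- pv_equiv track=rewrite | github.com/YizhuoWu/WebCrawler | crawler.py | is_growthing
-- ===== SOURCE A (Python) =====
-- def is_growthing(last,current):
--
--     last_str = last[len(last)::-1]
--     current_str = current[len(current)::-1]
--
--     last_num = ""
--     for i in last_str:
--         if i in "1234567890":
--             last_num += i
--         else:
--             break
--
--     current_num = ""
--     for p in current_str:
--         if p in "1234567890":
--             current_num += p
--         else:
--             break
--
--     last_num = last_num[len(last_num)::-1]
--     current_num = current_num[len(current_num)::-1]
--
--     if int(current_num) - int(last_num) == 1 or int(last_num) - int(current_num) == 1:
--         return True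
--     return False
-- ===== SOURCE B (Python) =====
-- def is_growthing(last, current):
--     # Slice off everything up to the end of the non-digit prefix: the part
--     # removed by rstrip("0123456789") is exactly the trailing digit run.
--     last_num = last[len(last.rstrip("0123456789")):]
--     current_num = current[len(current.rstrip("0123456789")):]
--     return abs(int(current_num) - int(last_num)) == 1
-- ===== Notes on version B (the rewrite author's own statement) =====
-- stated objective: idiomatic
-- what changed: Replaces the two reverse-slice-and-scan-with-break loops and second reversal by a single rstrip('0123456789') per string to locate the trailing digit run, then compares via abs(..) == 1.
import Mathlib
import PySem

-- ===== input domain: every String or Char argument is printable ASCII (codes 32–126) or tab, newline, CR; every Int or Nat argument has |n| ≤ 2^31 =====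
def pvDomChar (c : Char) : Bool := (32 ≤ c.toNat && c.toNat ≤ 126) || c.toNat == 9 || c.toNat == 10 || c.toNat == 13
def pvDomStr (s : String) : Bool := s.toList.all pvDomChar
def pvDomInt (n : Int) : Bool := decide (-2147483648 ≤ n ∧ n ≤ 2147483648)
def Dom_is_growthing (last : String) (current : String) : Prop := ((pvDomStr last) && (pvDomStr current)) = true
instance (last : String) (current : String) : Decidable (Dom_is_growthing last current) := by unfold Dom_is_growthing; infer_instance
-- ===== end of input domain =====

-- B replaces A's reverse-and-scan-with-break loops by an rstrip("0123456789")-based slice (idiomatic, same cost).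

-- ===== PORT A =====
-- the for-loop with break building last_num/current_num ("if i in "1234567890": acc += i else: break")
def pvLoopDigits : List Char → List Char → List Char
  | acc, [] => acc
  | acc, i :: rest =>
      if "1234567890".toList.contains i then pvLoopDigits (acc ++ [i]) rest else acc

def is_growthing (last : String) (current : String) : Bool :=
  let last_str := (PySem.List.slice? last.toList (some (last.toList.length : Int)) none (-1)).getD []
  let current_str := (PySem.List.slice? current.toList (some (current.toList.length : Int)) none (-1)).getD []
  let last_num := pvLoopDigits [] last_str
  let current_num := pvLoopDigits [] current_str
  let last_num := (PySem.List.slice? last_num (some (last_num.length : Int)) none (-1)).getD []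
  let current_num := (PySem.List.slice? current_num (some (current_num.length : Int)) none (-1)).getD []
  match PySem.Int.ofChars? current_num, PySem.Int.ofChars? last_num with
  | some c, some l => decide (c - l = 1 ∨ l - c = 1)
  | _, _ => false

-- ===== PORT B =====
-- s.rstrip("0123456789") has no PySem primitive; ported by hand as
-- (reverse ∘ dropWhile(digit) ∘ reverse), which is exact for rstrip with an explicit char set.
def pvRstripDigits (cs : List Char) : List Char :=
  (cs.reverse.dropWhile (fun c => "0123456789".toList.contains c)).reverse

def is_growthing_alt (last : String) (current : String) : Bool :=
  let last_num := last.toList.drop (pvRstripDigits last.toList).length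
  let current_num := current.toList.drop (pvRstripDigits current.toList).length
  ((PySem.Int.ofChars? current_num).bind (fun c =>
    (PySem.Int.ofChars? last_num).map (fun l => decide (|c - l| = 1)))).getD false

-- ===== PRECONDITION & SPEC =====
-- Pre_ excludes exactly the inputs where A raises ValueError: a string with no
-- trailing digit makes int("") raise in A (B raises there too).
def Pre_is_growthing (last : String) (current : String) : Prop :=
  (last.toList.getLast?.any (fun c => "0123456789".toList.contains c)) = true ∧
  (current.toList.getLast?.any (fun c => "0123456789".toList.contains c)) = true
instance (last : String) (current : String) : Decidable (Pre_is_growthing last current) := by unfold Pre_is_growthing; infer_instance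

def pvWitness_is_growthing : String × String := ("page1", "page2")

def Spec_is_growthing (last : String) (current : String) (out : Bool) : Prop := out = is_growthing_alt last current
instance (last : String) (current : String) (out : Bool) : Decidable (Spec_is_growthing last current out) := by unfold Spec_is_growthing; infer_instance

-- ===== CLAIM (what is proved, stated in full; the proofs are below) =====
def Claim_equal_is_growthing : Prop := ∀ (last : String) (current : String), Dom_is_growthing last current → Pre_is_growthing last current → Spec_is_growthing last current (is_growthing last current)

-- ===== LEMMAS AND PROOFS =====

-- s[len(s)::-1] is a full reversal (start = len clamps to len-1, the default for step -1)
theorem pv_slice_len_rev {α : Type} (xs : List α) :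
    PySem.List.slice? xs (some (xs.length : Int)) none (-1) = some xs.reverse := by
  have h : PySem.List.sliceIndices xs.length (some (xs.length : Int)) none (-1)
      = PySem.List.sliceIndices xs.length none none (-1) := by
    simp [PySem.List.sliceIndices]
  have h2 : PySem.List.slice? xs (some (xs.length : Int)) none (-1)
      = PySem.List.slice? xs none none (-1) := by
    unfold PySem.List.slice?; rw [h]
  rw [h2, PySem.List.slice?_none_none_neg_one]

-- A's break-loop is takeWhile
theorem pvLoopDigits_eq (acc l : List Char) :
    pvLoopDigits acc l = acc ++ l.takeWhile (fun c => "1234567890".toList.contains c) := by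
  induction l generalizing acc with
  | nil => simp [pvLoopDigits]
  | cons i rest ih =>
      rw [List.takeWhile_cons]
      cases h : "1234567890".toList.contains i with
      | true => simp only [pvLoopDigits, h, if_true, ih]; simp
      | false => simp only [pvLoopDigits, h]; simp

-- the two digit alphabets test the same characters
theorem pv_digit_eq (c : Char) :
    ("1234567890".toList.contains c) = ("0123456789".toList.contains c) := by
  simp only [List.contains_eq_mem, decide_eq_decide]
  constructor <;> intro h <;> simp_all <;> tauto

-- B's drop-after-rstrip is A's reverse-takeWhile-reverse
theorem pv_tail_eq (cs : List Char) :
    cs.drop (pvRstripDigits cs).length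
      = (cs.reverse.takeWhile (fun c => "1234567890".toList.contains c)).reverse := by
  unfold pvRstripDigits
  have hpred : (fun c => "0123456789".toList.contains c)
      = (fun c => "1234567890".toList.contains c) := by
    funext c; exact (pv_digit_eq c).symm
  rw [hpred]
  set p := (fun c => "1234567890".toList.contains c) with hp
  have hsplit : cs.reverse = cs.reverse.takeWhile p ++ cs.reverse.dropWhile p :=
    (List.takeWhile_append_dropWhile).symm
  have hcs : cs = (cs.reverse.dropWhile p).reverse ++ (cs.reverse.takeWhile p).reverse := by
    conv_lhs => rw [← List.reverse_reverse cs, hsplit]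
    rw [List.reverse_append]
  calc cs.drop ((cs.reverse.dropWhile p).reverse).length
      = ((cs.reverse.dropWhile p).reverse ++ (cs.reverse.takeWhile p).reverse).drop
          ((cs.reverse.dropWhile p).reverse).length := by rw [← hcs]
    _ = (cs.reverse.takeWhile p).reverse := List.drop_left

-- ===== VERDICT (by name: the statement is the Claim_ definition above) =====
theorem is_growthing_spec : Claim_equal_is_growthing := by
  intro last current _ _
  unfold Spec_is_growthing is_growthing is_growthing_alt
  rw [pv_slice_len_rev, pv_slice_len_rev]
  simp only [Option.getD_some]
  rw [pvLoopDigits_eq, pvLoopDigits_eq]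
  simp only [List.nil_append]
  rw [pv_slice_len_rev, pv_slice_len_rev]
  simp only [Option.getD_some]
  rw [pv_tail_eq, pv_tail_eq]
  cases hc : PySem.Int.ofChars?
      ((current.toList.reverse.takeWhile (fun c => "1234567890".toList.contains c)).reverse) with
  | none =>
      cases PySem.Int.ofChars?
        ((last.toList.reverse.takeWhile (fun c => "1234567890".toList.contains c)).reverse) <;> rfl
  | some c =>
      cases PySem.Int.ofChars?
        ((last.toList.reverse.takeWhile (fun c => "1234567890".toList.contains c)).reverse) with
      | none => rfl
      | some l =>
          simp only [Option.bind_some, Option.map_some, Option.getD_some, decide_eq_decide]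
          rw [show |c - l| = 1 ↔ (c - l = 1 ∨ c - l = -1) from abs_eq (by norm_num)]
          omega
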